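-- pv_equiv track=rewrite | github.com/Polytech-E2I/info-unix | TP06_04/anagrams.py | anagramme_pos
-- ===== SOURCE A (Python) =====
-- def anagramme_pos(string: str, pos: int) -> list[str]:
--     length = len(string)
--
--     if pos < 0 or pos >= length:
--         raise ValueError
--
--     if length == 1:
--         return [string]
--
--     return_list = []
--
--     # Define a new string without the cornerstone character
--     new_string = ""
--     if pos == 0:
--         new_string = string[1:]
--     else:
--         new_string = string[:pos] + string[pos+1:]
--
--     # Get anagrams for the new string and append them to the return list
--     for i in range(len(new_string)):
--         permuts = anagramme_pos(new_string, i)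
--
--         for permut in permuts:
--             return_list.append(string[pos] + permut)
--
--     return return_list
-- ===== SOURCE B (Python) =====
-- def anagramme_pos(string: str, pos: int) -> list[str]:
--     # Iterative worklist (level-by-level) instead of recursion; same output order.
--     n = len(string)
--     if pos < 0 or pos >= n:
--         raise ValueError
--     rest = string[:pos] + string[pos+1:]
--     level = [(string[pos], rest)]
--     for _ in range(len(rest)):
--         level = [(prefix + rem[i], rem[:i] + rem[i+1:])
--                  for prefix, rem in level
--                  for i in range(len(rem))]
--     return [prefix for prefix, _ in level]
-- ===== Notes on version B (the rewrite author's own statement) =====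
-- stated objective: alternative
-- what changed: Replaces A's recursion (recursive calls for every remaining index, nested append loop) by an iterative breadth-first worklist: a list of (prefix, remaining) pairs expanded level by level for len(rest) rounds, yielding the same permutations in the same order.
import Mathlib
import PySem

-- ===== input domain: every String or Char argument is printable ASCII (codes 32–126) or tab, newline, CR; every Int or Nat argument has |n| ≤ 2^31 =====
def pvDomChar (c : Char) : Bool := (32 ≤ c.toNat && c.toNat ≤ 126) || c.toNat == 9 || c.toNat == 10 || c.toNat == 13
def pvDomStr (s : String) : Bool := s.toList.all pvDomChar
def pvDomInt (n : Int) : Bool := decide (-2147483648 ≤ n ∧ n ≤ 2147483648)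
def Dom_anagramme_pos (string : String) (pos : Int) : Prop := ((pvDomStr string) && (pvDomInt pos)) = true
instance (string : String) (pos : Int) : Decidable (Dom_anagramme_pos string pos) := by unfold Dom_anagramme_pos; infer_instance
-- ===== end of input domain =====

-- B replaces A's recursion by an iterative level-by-level worklist; same value, 'alternative' objective.

-- ===== PORT A =====
-- A's recursion, over List Char (strings as char lists; String.mk applied at the boundary).
-- Inputs failing A's ValueError guard (excluded by Pre_) return [].
def anagAuxA (s : List Char) (pos : Int) : List (List Char) :=
  if h : pos < 0 ∨ (s.length : Int) ≤ pos then []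
  else if h1 : s.length = 1 then [s]
  else
    let new_string : List Char :=
      if pos = 0 then s.drop 1 else s.take pos.toNat ++ s.drop (pos.toNat + 1)
    (List.range new_string.length).flatMap
      (fun (i : Nat) => (anagAuxA new_string (i : Int)).map
        (fun permut => s.getD pos.toNat ' ' :: permut))
termination_by s.length
decreasing_by
  split <;> simp <;> omega

def anagramme_pos (string : String) (pos : Int) : List String :=
  (anagAuxA string.toList pos).map (fun l => String.mk l)

-- ===== PORT B =====
def anagramme_pos_alt (string : String) (pos : Int) : List String :=
  let s := string.toList
  let n := s.length
  if pos < 0 ∨ (n : Int) ≤ pos then []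
  else
    let rest := s.take pos.toNat ++ s.drop (pos.toNat + 1)
    let init : List (List Char × List Char) := [([s.getD pos.toNat ' '], rest)]
    let final := (List.range rest.length).foldl
      (fun level _ =>
        level.flatMap (fun pr =>
          (List.range pr.2.length).map (fun i =>
            (pr.1 ++ [pr.2.getD i ' '], pr.2.take i ++ pr.2.drop (i + 1)))))
      init
    final.map (fun pr => String.mk pr.1)

-- ===== PRECONDITION & SPEC =====
-- A raises ValueError exactly when pos < 0 or pos >= len(string) (in particular on the empty string).
def Pre_anagramme_pos (string : String) (pos : Int) : Prop :=
  0 ≤ pos ∧ pos < (string.toList.length : Int)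
instance (string : String) (pos : Int) : Decidable (Pre_anagramme_pos string pos) := by
  unfold Pre_anagramme_pos; infer_instance

def pvWitness_anagramme_pos : String × Int := ("abc", 1)

def Spec_anagramme_pos (string : String) (pos : Int) (out : List String) : Prop := out = anagramme_pos_alt string pos
instance (string : String) (pos : Int) (out : List String) : Decidable (Spec_anagramme_pos string pos out) := by unfold Spec_anagramme_pos; infer_instance

-- ===== CLAIM (what is proved, stated in full; the proofs are below) =====
def Claim_equal_anagramme_pos : Prop := ∀ (string : String) (pos : Int), Dom_anagramme_pos string pos → Pre_anagramme_pos string pos → Spec_anagramme_pos string pos (anagramme_pos string pos)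

-- ===== LEMMAS AND PROOFS =====

-- All permutations of l (as char lists), in Python's fix-each-index-in-turn order; fuel = l.length.
def permsN : Nat → List Char → List (List Char)
  | 0, _ => [[]]
  | n + 1, l =>
    (List.range l.length).flatMap
      (fun i => (permsN n (l.take i ++ l.drop (i + 1))).map
        (fun p => l.getD i ' ' :: p))

-- one worklist round of B
def expandB (level : List (List Char × List Char)) : List (List Char × List Char) :=
  level.flatMap (fun pr =>
    (List.range pr.2.length).map (fun i =>
      (pr.1 ++ [pr.2.getD i ' '], pr.2.take i ++ pr.2.drop (i + 1))))

lemma remove_len {l : List Char} {i : Nat} (h : i < l.length) :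
    (l.take i ++ l.drop (i + 1)).length = l.length - 1 := by
  simp; omega

lemma foldl_const_iterate {α : Type} (g : α → α) (n : Nat) (init : α) :
    (List.range n).foldl (fun a _ => g a) init = g^[n] init := by
  induction n generalizing init with
  | zero => simp
  | succ m ih =>
    rw [List.range_succ_eq_map]
    simp only [List.foldl_cons, List.foldl_map]
    rw [ih, Function.iterate_succ_apply]

lemma anagAuxA_eq (n : Nat) : ∀ (s : List Char) (pos : Int), s.length = n →
    0 ≤ pos → pos < (n : Int) →
    anagAuxA s pos =
      (permsN (n - 1) (s.take pos.toNat ++ s.drop (pos.toNat + 1))).map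
        (fun p => s.getD pos.toNat ' ' :: p) := by
  induction n using Nat.strong_induction_on with
  | _ n ih =>
    intro s pos hlen h0 hlt
    rw [anagAuxA]
    rw [dif_neg (by omega)]
    by_cases h1 : s.length = 1
    · rw [dif_pos h1]
      have hn : n = 1 := by omega
      have hp : pos = 0 := by omega
      subst hn hp
      match s, h1 with
      | [c], _ => simp [permsN]
    · rw [dif_neg h1]
      have hn2 : 2 ≤ n := by omega
      have hplt : pos.toNat < n := by omega
      have hns : (if pos = 0 then s.drop 1
          else s.take pos.toNat ++ s.drop (pos.toNat + 1))
          = s.take pos.toNat ++ s.drop (pos.toNat + 1) := by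
        split
        · have : pos.toNat = 0 := by omega
          simp [this]
        · rfl
      simp only [hns]
      have hnslen : (s.take pos.toNat ++ s.drop (pos.toNat + 1)).length = n - 1 := by
        rw [remove_len (by omega)]; omega
      have hperm : permsN (n - 1) (s.take pos.toNat ++ s.drop (pos.toNat + 1)) =
          (List.range (s.take pos.toNat ++ s.drop (pos.toNat + 1)).length).flatMap
            (fun i => (permsN (n - 2) ((s.take pos.toNat ++ s.drop (pos.toNat + 1)).take i
                ++ (s.take pos.toNat ++ s.drop (pos.toNat + 1)).drop (i + 1))).map
              (fun q => (s.take pos.toNat ++ s.drop (pos.toNat + 1)).getD i ' ' :: q)) := by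
        have h' : n - 1 = (n - 2) + 1 := by omega
        rw [h', permsN, hnslen, h']
      rw [hperm, List.map_flatMap]
      apply List.flatMap_congr
      intro i hi
      have hilt : i < n - 1 := by
        rw [List.mem_range, hnslen] at hi; exact hi
      rw [ih (n - 1) (by omega) _ ((i : Nat) : Int) hnslen (by omega)
        (by push_cast; omega)]
      have hti : (((i : Nat) : Int)).toNat = i := by omega
      rw [hti, show n - 1 - 1 = n - 2 from by omega]

lemma expandB_len {m : Nat} {level : List (List Char × List Char)}
    (h : ∀ pr ∈ level, pr.2.length = m + 1) :
    ∀ pr' ∈ expandB level, pr'.2.length = m := by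
  intro pr' hpr'
  unfold expandB at hpr'
  simp only [List.mem_flatMap, List.mem_map, List.mem_range] at hpr'
  obtain ⟨pr, hpr, i, hi, heq⟩ := hpr'
  have := h pr hpr
  subst heq
  simp only
  rw [remove_len hi, this]
  omega

lemma bfs_eq (m : Nat) : ∀ (level : List (List Char × List Char)),
    (∀ pr ∈ level, pr.2.length = m) →
    (expandB^[m] level).map Prod.fst
      = level.flatMap (fun pr => (permsN m pr.2).map (fun q => pr.1 ++ q)) := by
  induction m with
  | zero =>
    intro level _
    simp only [Function.iterate_zero, id_eq, permsN, List.map_cons, List.map_nil,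
      List.append_nil]
    exact List.map_eq_flatMap
  | succ m ih =>
    intro level hlen
    rw [Function.iterate_succ_apply, ih (expandB level) (expandB_len hlen)]
    unfold expandB
    rw [List.flatMap_assoc]
    apply List.flatMap_congr
    intro pr hpr
    rw [List.flatMap_map]
    have hprl : pr.2.length = m + 1 := hlen pr hpr
    have hperm : permsN (m + 1) pr.2 =
        (List.range pr.2.length).flatMap
          (fun i => (permsN m (pr.2.take i ++ pr.2.drop (i + 1))).map
            (fun q => pr.2.getD i ' ' :: q)) := by
      rw [permsN]
    rw [hperm, List.map_flatMap]
    apply List.flatMap_congr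
    intro i _
    simp only [List.map_map]
    apply List.map_congr_left
    intro q _
    simp

lemma altB_eq (s : List Char) (p : Nat) (hp : p < s.length) :
    ((List.range (s.take p ++ s.drop (p + 1)).length).foldl
        (fun level _ =>
          level.flatMap (fun pr =>
            (List.range pr.2.length).map (fun i =>
              (pr.1 ++ [pr.2.getD i ' '], pr.2.take i ++ pr.2.drop (i + 1)))))
        [([s.getD p ' '], s.take p ++ s.drop (p + 1))]).map (fun pr => String.mk pr.1)
    = (permsN (s.length - 1) (s.take p ++ s.drop (p + 1))).map
        (fun q => String.mk (s.getD p ' ' :: q)) := by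
  have hrlen : (s.take p ++ s.drop (p + 1)).length = s.length - 1 := remove_len hp
  have hfold : (List.range (s.take p ++ s.drop (p + 1)).length).foldl
      (fun level _ =>
        level.flatMap (fun pr =>
          (List.range pr.2.length).map (fun i =>
            (pr.1 ++ [pr.2.getD i ' '], pr.2.take i ++ pr.2.drop (i + 1)))))
      [([s.getD p ' '], s.take p ++ s.drop (p + 1))]
      = expandB^[(s.take p ++ s.drop (p + 1)).length]
          [([s.getD p ' '], s.take p ++ s.drop (p + 1))] :=
    foldl_const_iterate expandB _ _
  have hb := bfs_eq (s.take p ++ s.drop (p + 1)).length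
    [([s.getD p ' '], s.take p ++ s.drop (p + 1))]
    (by intro pr hpr; simp only [List.mem_singleton] at hpr; rw [hpr])
  rw [hfold]
  rw [show (fun pr : List Char × List Char => String.mk pr.1)
      = (String.mk ∘ Prod.fst) from rfl]
  rw [← List.map_map, hb, hrlen]
  simp [List.map_map]

-- ===== VERDICT (by name: the statement is the Claim_ definition above) =====
theorem anagramme_pos_spec : Claim_equal_anagramme_pos := by
  intro string pos _ hpre
  obtain ⟨h0, hlt⟩ := hpre
  unfold Spec_anagramme_pos
  simp only [anagramme_pos, anagramme_pos_alt]
  rw [if_neg (by omega : ¬(pos < 0 ∨ (string.toList.length : Int) ≤ pos))]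
  rw [anagAuxA_eq string.toList.length string.toList pos rfl h0 (by omega)]
  rw [altB_eq string.toList pos.toNat (by omega)]
  simp [List.map_map]
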